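-- pv_equiv track=rewrite | github.com/GauravB09/LeetCode-Submissions | 1333-sort-the-jumbled-numbers/1333-sort-the-jumbled-numbers.py | getNewNumber
-- ===== SOURCE A (Python) =====
-- from typing import List
--
-- def getNewNumber(mapping: List[int], num: int) -> int:
--     ans = 0
--     place = 1
--     if num == 0:
--         return mapping[0]
--     while num > 0:
--         ans = (place * mapping[num%10]) + ans
--         place *= 10
--         num //= 10
--     return ans
-- ===== SOURCE B (Python) =====
-- from typing import List
--
-- def getNewNumber(mapping: List[int], num: int) -> int:
--     if num == 0:
--         return mapping[0]
--     digits = []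
--     n = num
--     while n > 0:
--         digits.append(n % 10)
--         n //= 10
--     ans = 0
--     for d in reversed(digits):
--         ans = ans * 10 + mapping[d]
--     return ans
-- ===== Notes on version B (the rewrite author's own statement) =====
-- stated objective: alternative
-- what changed: B first collects the digits into a list, then folds over them most-significant-first in Horner form (ans = ans*10 + mapping[d]), instead of A's single LSB-first loop maintaining an explicit place = 10^i multiplier.
import Mathlib
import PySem

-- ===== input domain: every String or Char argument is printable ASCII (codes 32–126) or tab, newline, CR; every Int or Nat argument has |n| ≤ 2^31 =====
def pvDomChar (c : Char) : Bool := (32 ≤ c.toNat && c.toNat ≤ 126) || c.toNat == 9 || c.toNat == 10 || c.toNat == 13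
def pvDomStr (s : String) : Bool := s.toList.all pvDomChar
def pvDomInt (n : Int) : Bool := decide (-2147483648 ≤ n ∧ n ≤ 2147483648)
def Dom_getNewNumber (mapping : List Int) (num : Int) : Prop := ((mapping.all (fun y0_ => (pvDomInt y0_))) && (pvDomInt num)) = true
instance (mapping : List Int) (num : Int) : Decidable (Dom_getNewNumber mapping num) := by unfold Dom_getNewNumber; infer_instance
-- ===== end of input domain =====

-- B collects the digits into a list and folds them MSB-first in Horner form,
-- instead of A's LSB-first loop with an explicit place = 10^i multiplier (objective: alternative).


-- ===== PORT A =====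
-- A's while loop; mapping[num%10] is ported with pyGet? (none = IndexError), defaulted to 0:
-- Pre_getNewNumber excludes exactly the inputs where Python raises, so the default is never
-- reached on admitted inputs.
def getNewNumberLoop (mapping : List Int) (ans place num : Int) : Int :=
  if h : 0 < num then
    getNewNumberLoop mapping
      ((place * (PySem.List.pyGet? mapping (PySem.Int.mod num 10)).getD 0) + ans)
      (place * 10) (PySem.Int.floordiv num 10)
  else ans
termination_by num.toNat
decreasing_by
  simp only [PySem.Int.floordiv]
  rw [Int.fdiv_eq_ediv]
  omega

def getNewNumber (mapping : List Int) (num : Int) : Int :=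
  if num = 0 then (PySem.List.pyGet? mapping 0).getD 0
  else getNewNumberLoop mapping 0 1 num

-- ===== PORT B =====
-- B phase 1: the digit list of num, least significant first (Python's while n > 0 append loop).
def digitsOf (num : Int) : List Int :=
  if _h : 0 < num then PySem.Int.mod num 10 :: digitsOf (PySem.Int.floordiv num 10)
  else []
termination_by num.toNat
decreasing_by
  simp only [PySem.Int.floordiv]
  rw [Int.fdiv_eq_ediv]
  omega

-- B phase 2: Horner fold over the reversed (MSB-first) digit list.
def getNewNumber_alt (mapping : List Int) (num : Int) : Int :=
  if num = 0 then (PySem.List.pyGet? mapping 0).getD 0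
  else (digitsOf num).reverse.foldl
    (fun ans d => ans * 10 + (PySem.List.pyGet? mapping d).getD 0) 0

-- ===== PRECONDITION & SPEC =====
-- Pre_ excludes exactly the inputs where Python A raises IndexError: num = 0 with an empty
-- mapping, or num > 0 with some decimal digit of num not an index into mapping (digits of
-- num ≤ 2^31 all lie in the first 10 base-10 positions, which the bound i < 10 covers).
def Pre_getNewNumber (mapping : List Int) (num : Int) : Prop :=
  (num = 0 → mapping ≠ []) ∧
  (0 < num → ∀ i : Nat, i < 10 → (num / (10 ^ i : Int)) % 10 < (mapping.length : Int))
instance (mapping : List Int) (num : Int) : Decidable (Pre_getNewNumber mapping num) := by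
  unfold Pre_getNewNumber; infer_instance
def pvWitness_getNewNumber : List Int × Int := ([7, 3, 9, 0, 1, 5, 2, 8, 4, 6], 2037)
def Spec_getNewNumber (mapping : List Int) (num : Int) (out : Int) : Prop := out = getNewNumber_alt mapping num
instance (mapping : List Int) (num : Int) (out : Int) : Decidable (Spec_getNewNumber mapping num out) := by unfold Spec_getNewNumber; infer_instance

-- ===== CLAIM (what is proved, stated in full; the proofs are below) =====
def Claim_equal_getNewNumber : Prop := ∀ (mapping : List Int) (num : Int), Dom_getNewNumber mapping num → Pre_getNewNumber mapping num → Spec_getNewNumber mapping num (getNewNumber mapping num)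

-- ===== LEMMAS AND PROOFS =====

-- The Horner value B computes from num's digits (named for the proof only).
def hornerOf (mapping : List Int) (num : Int) : Int :=
  (digitsOf num).reverse.foldl
    (fun ans d => ans * 10 + (PySem.List.pyGet? mapping d).getD 0) 0

theorem hornerOf_step (mapping : List Int) (num : Int) (h : 0 < num) :
    hornerOf mapping num =
      hornerOf mapping (PySem.Int.floordiv num 10) * 10 +
        (PySem.List.pyGet? mapping (PySem.Int.mod num 10)).getD 0 := by
  rw [hornerOf, digitsOf.eq_def]
  simp [h, hornerOf, List.foldl_append]

theorem getNewNumberLoop_eq (mapping : List Int) :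
    ∀ ans place num : Int,
      getNewNumberLoop mapping ans place num = ans + place * hornerOf mapping num := by
  intro ans place num
  induction ans, place, num using getNewNumberLoop.induct mapping with
  | case1 ans place num h ih =>
    rw [getNewNumberLoop, hornerOf_step mapping num h]
    simp only [h, dite_true, ih]
    ring
  | case2 ans place num h =>
    rw [getNewNumberLoop, hornerOf, digitsOf.eq_def]
    simp [h]

-- ===== VERDICT (by name: the statement is the Claim_ definition above) =====
theorem getNewNumber_spec : Claim_equal_getNewNumber := by
  intro mapping num _ _
  unfold Spec_getNewNumber getNewNumber getNewNumber_alt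
  by_cases h : num = 0
  · simp [h]
  · simp only [h, if_false]
    rw [getNewNumberLoop_eq mapping 0 1 num, ← hornerOf]
    ring
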